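-- pv_equiv track=rewrite | github.com/Sebastiaanvk/Advent-of-Code | Advent of Code 2023/Day 21.py | calcAccDistances
-- ===== SOURCE A (Python) =====
-- from collections import deque,defaultdict
--
-- def calcAccDistances(distances):
--     numberAtDistance = defaultdict(int)
--     maxDist = 0
--     for x in distances:
--         numberAtDistance[distances[x]] += 1
--         maxDist = max(maxDist,distances[x])
--     accEven = 0
--     accOdd = 0
--     accDistances = {}
--     for i in range(0,maxDist+1):
--         if i%2==0:
--             accEven += numberAtDistance[i]
--             accDistances[i] = accEven
--         else:
--             accOdd += numberAtDistance[i]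
--             accDistances[i] = accOdd
--
--     return accDistances,maxDist
-- ===== SOURCE B (Python) =====
-- def calcAccDistances(distances):
--     # Count directly from the definition: accDistances[i] is the number of
--     # distances v in the window 0..i with the same parity as i.
--     vals = list(distances.values())
--     maxDist = max(max(vals, default=0), 0)
--     accDistances = {
--         i: sum(1 for v in vals if 0 <= v <= i and v % 2 == i % 2)
--         for i in range(maxDist + 1)
--     }
--     return accDistances, maxDist
-- ===== Notes on version B (the rewrite author's own statement) =====
-- stated objective: alternative
-- what changed: B drops the histogram and the running even/odd prefix sums entirely: for each i it counts, directly from the definition, how many distance values lie in 0..i with the parity of i (a per-entry predicate count over the raw values), and takes maxDist via max(..., default=0); it trades A's O(n+maxDist) incremental accumulation for an O(n*maxDist) direct count.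
import Mathlib
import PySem

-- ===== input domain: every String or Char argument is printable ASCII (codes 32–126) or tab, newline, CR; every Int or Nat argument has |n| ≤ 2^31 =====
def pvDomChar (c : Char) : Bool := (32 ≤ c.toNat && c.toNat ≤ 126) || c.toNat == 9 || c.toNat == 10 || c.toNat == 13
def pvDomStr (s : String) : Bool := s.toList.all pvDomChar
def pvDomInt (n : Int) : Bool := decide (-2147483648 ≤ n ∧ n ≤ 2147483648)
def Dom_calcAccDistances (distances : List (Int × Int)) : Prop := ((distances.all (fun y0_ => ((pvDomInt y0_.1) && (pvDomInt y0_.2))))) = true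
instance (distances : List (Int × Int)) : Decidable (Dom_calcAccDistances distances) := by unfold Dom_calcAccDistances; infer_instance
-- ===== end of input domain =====

-- B drops A's histogram and even/odd running sums: each entry accDistances[i] is obtained by
-- directly counting the distance values in the window 0..i with the parity of i (objective: alternative).

-- ===== PORT A =====
-- 'for x in distances: numberAtDistance[distances[x]] += 1; maxDist = max(maxDist, distances[x])':
-- iterating a Python dict's keys and indexing it by each key visits exactly its (key, value) items,
-- so the loop is a fold over the items reading the value p.2 (exact: dict keys are unique).
def calcAccDistances (distances : List (Int × Int)) : (List (Int × Int)) × Int :=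
  let st := distances.foldl
      (fun (s : PySem.Dict Int Int × Int) p => (s.1.modify p.2 0 (· + 1), max s.2 p.2))
      (PySem.Dict.empty, 0)
  let numberAtDistance := st.1
  let maxDist := st.2
  let fin := (PySem.List.pyRange 0 (maxDist + 1) 1).foldl
      (fun (s : Int × Int × PySem.Dict Int Int) i =>
        if PySem.Int.mod i 2 == 0 then
          (s.1 + numberAtDistance.getD i 0, s.2.1,
           s.2.2.insert i (s.1 + numberAtDistance.getD i 0))
        else
          (s.1, s.2.1 + numberAtDistance.getD i 0,
           s.2.2.insert i (s.2.1 + numberAtDistance.getD i 0)))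
      (0, 0, PySem.Dict.empty)
  (fin.2.2.items, maxDist)

-- ===== PORT B =====
-- the dict comprehension runs over the strictly increasing keys range(0, maxDist+1), so its items
-- list is exactly this map (exact); 'sum(1 for v in vals if p(v))' is countP.
def calcAccDistances_alt (distances : List (Int × Int)) : (List (Int × Int)) × Int :=
  let vals := distances.map (·.2)
  let maxDist := max (PySem.List.maxD vals (fun x => x) 0) 0
  let accDistances := (PySem.List.pyRange 0 (maxDist + 1) 1).map
      (fun i => (i, ((vals.countP (fun v =>
          decide (0 ≤ v) && decide (v ≤ i) &&
            (PySem.Int.mod v 2 == PySem.Int.mod i 2)) : Nat) : Int)))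
  (accDistances, maxDist)

-- ===== PRECONDITION & SPEC =====
def Spec_calcAccDistances (distances : List (Int × Int)) (out : (List (Int × Int)) × Int) : Prop := out = calcAccDistances_alt distances
instance (distances : List (Int × Int)) (out : (List (Int × Int)) × Int) : Decidable (Spec_calcAccDistances distances out) := by unfold Spec_calcAccDistances; infer_instance

-- ===== CLAIM (what is proved, stated in full; the proofs are below) =====
def Claim_equal_calcAccDistances : Prop := ∀ (distances : List (Int × Int)), Dom_calcAccDistances distances → Spec_calcAccDistances distances (calcAccDistances distances)

-- ===== LEMMAS AND PROOFS =====

-- the histogram lookup A's second loop performs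
def pvH (hist : PySem.Dict Int Int) (i : Int) : Int := hist.getD i 0

-- the two-step recurrence underlying the parity-cumulative sums
def pvC (hist : PySem.Dict Int Int) : Nat → Int
  | 0 => pvH hist 0
  | 1 => pvH hist 1
  | n + 2 => pvC hist n + pvH hist (n + 2)

-- A's running even/odd sums after processing 0 .. n-1
def pvE (hist : PySem.Dict Int Int) : Nat → Int
  | 0 => 0
  | n + 1 => pvE hist n + if n % 2 = 0 then pvH hist n else 0

def pvO (hist : PySem.Dict Int Int) : Nat → Int
  | 0 => 0
  | n + 1 => pvO hist n + if n % 2 = 1 then pvH hist n else 0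

-- the accumulated-distances dict after processing 0 .. n-1, as an items list
def pvL (hist : PySem.Dict Int Int) (n : Nat) : List (Int × Int) :=
  (List.range n).map (fun (k : Nat) => ((k : Int), pvC hist k))

-- B's per-entry predicate count
def pvCnt (vals : List Int) (i : Int) : Nat :=
  vals.countP (fun v =>
    decide (0 ≤ v) && decide (v ≤ i) && (PySem.Int.mod v 2 == PySem.Int.mod i 2))

lemma pvL_contains_self (hist : PySem.Dict Int Int) (n : Nat) :
    (PySem.Dict.mk (pvL hist n)).contains ((n : Nat) : Int) = false := by
  rw [PySem.Dict.contains_eq_decide_mem_keys]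
  simp only [PySem.Dict.keys_mk, pvL, List.map_map, decide_eq_false_iff_not]
  intro h
  obtain ⟨k, hk, hke⟩ := List.mem_map.mp h
  have h1 := List.mem_range.mp hk
  have h2 : (k : Int) = (n : Int) := by simpa using hke
  omega

lemma pvL_insert (hist : PySem.Dict Int Int) (n : Nat) (v : Int) :
    ((PySem.Dict.mk (pvL hist n)).insert ((n : Nat) : Int) v).items
      = pvL hist n ++ [(((n : Nat) : Int), v)] := by
  rw [PySem.Dict.items_insert_of_not_contains _ _ (pvL_contains_self hist n)]

-- parity cumulative sums agree with the two-step recurrence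
lemma pvCE (hist : PySem.Dict Int Int) :
    ∀ n : Nat, (n % 2 = 0 → pvE hist (n + 1) = pvC hist n)
             ∧ (n % 2 = 1 → pvO hist (n + 1) = pvC hist n) := by
  intro n
  induction n using Nat.strong_induction_on with
  | _ n ih =>
    match n with
    | 0 => simp [pvE, pvO, pvC]
    | 1 => simp [pvE, pvO, pvC]
    | n + 2 =>
      obtain ⟨ihe, iho⟩ := ih n (by omega)
      refine ⟨fun h => ?_, fun h => ?_⟩
      · have hn : n % 2 = 0 := by omega
        have ha : (n + 2) % 2 = 0 := by omega
        have hb : ¬ (n + 1) % 2 = 0 := by omega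
        rw [show pvC hist (n + 2) = pvC hist n + pvH hist ((n + 2 : Nat) : Int) from rfl,
            ← ihe hn]
        simp only [pvE, ha, hb, if_pos]
        simp [hn]
      · have hn : n % 2 = 1 := by omega
        have ha : (n + 2) % 2 = 1 := by omega
        have hb : ¬ (n + 1) % 2 = 1 := by omega
        rw [show pvC hist (n + 2) = pvC hist n + pvH hist ((n + 2 : Nat) : Int) from rfl,
            ← iho hn]
        simp only [pvO, ha, hb, if_pos]
        simp [hn]

-- A's second loop over range(0, n) produces (pvE n, pvO n, pvL hist n)
lemma pvLoopA (hist : PySem.Dict Int Int) (n : Nat) :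
    (PySem.List.pyRange 0 (n : Int) 1).foldl
      (fun (s : Int × Int × PySem.Dict Int Int) i =>
        if PySem.Int.mod i 2 == 0 then
          (s.1 + hist.getD i 0, s.2.1, s.2.2.insert i (s.1 + hist.getD i 0))
        else
          (s.1, s.2.1 + hist.getD i 0, s.2.2.insert i (s.2.1 + hist.getD i 0)))
      (0, 0, PySem.Dict.empty)
      = (pvE hist n, pvO hist n, PySem.Dict.mk (pvL hist n)) := by
  induction n with
  | zero =>
    rw [PySem.List.pyRange_one_eq_nil (by omega)]
    rfl
  | succ n ih =>
    have hcast : ((n + 1 : Nat) : Int) = (n : Int) + 1 := by push_cast; ring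
    rw [hcast, PySem.List.pyRange_one_succ_right (by positivity), List.foldl_append, ih]
    simp only [List.foldl_cons, List.foldl_nil]
    obtain ⟨hce, hco⟩ := pvCE hist n
    by_cases hpar : n % 2 = 0
    · rw [if_pos (by
        simp only [PySem.Int.mod_eq_emod_of_pos (by norm_num : (0 : Int) < 2), beq_iff_eq]
        omega)]
      refine Prod.ext ?_ (Prod.ext ?_ ?_)
      · simp [pvE, hpar, pvH]
      · simp [pvO, hpar]
      · apply PySem.Dict.ext
        rw [pvL_insert]
        have hv : pvE hist n + hist.getD ((n : Nat) : Int) 0 = pvC hist n := by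
          rw [← hce hpar]; simp [pvE, hpar, pvH]
        rw [hv]
        simp [pvL, List.range_succ]
    · have hpar1 : n % 2 = 1 := by omega
      rw [if_neg (by
        simp only [PySem.Int.mod_eq_emod_of_pos (by norm_num : (0 : Int) < 2), beq_iff_eq]
        omega)]
      refine Prod.ext ?_ (Prod.ext ?_ ?_)
      · simp [pvE, hpar]
      · simp [pvO, hpar1, pvH]
      · apply PySem.Dict.ext
        rw [pvL_insert]
        have hv : pvO hist n + hist.getD ((n : Nat) : Int) 0 = pvC hist n := by
          rw [← hco hpar1]; simp [pvO, hpar1, pvH]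
        rw [hv]
        simp [pvL, List.range_succ]

-- A's first loop is Counter(values) paired with the running max
lemma pvHistEq (distances : List (Int × Int)) :
    distances.foldl
      (fun (s : PySem.Dict Int Int × Int) p => (s.1.modify p.2 0 (· + 1), max s.2 p.2))
      (PySem.Dict.empty, 0)
      = (PySem.Dict.counter (distances.map (·.2)), (distances.map (·.2)).foldl max 0) := by
  have h := PySem.List.foldl_prod_mk
      (fun (d : PySem.Dict Int Int) (p : Int × Int) => d.modify p.2 0 (· + 1))
      (fun (m : Int) (p : Int × Int) => max m p.2) distances PySem.Dict.empty 0
  simp only [] at h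
  rw [h, PySem.Dict.counter_eq_foldl, List.foldl_map, List.foldl_map]

-- a running max can absorb one operand of its seed
lemma pvFoldlMax (t : List Int) : ∀ a b : Int, t.foldl max (max a b) = max (t.foldl max a) b := by
  induction t with
  | nil => intro a b; rfl
  | cons y t ih =>
    intro a b
    simp only [List.foldl_cons]
    rw [max_right_comm, ih]

-- A's running max over the values equals max(max(vals, default=0), 0)
lemma pvMaxEq (vals : List Int) :
    vals.foldl max 0 = max (PySem.List.maxD vals (fun x => x) 0) 0 := by
  cases vals with
  | nil => decide
  | cons x t =>
    have hm : PySem.List.maxD (x :: t) (fun x => x) 0 = t.foldl max x := by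
      simp [PySem.List.maxD, PySem.List.max?_id_cons]
    rw [hm]
    simp only [List.foldl_cons]
    rw [show max (0 : Int) x = max x 0 from max_comm 0 x, pvFoldlMax]

-- splitting a predicate count: p = q ∨ (= n), with q false at n
lemma pvCountSplit (l : List Int) (p q : Int → Bool) (n : Int)
    (h : ∀ v, p v = (q v || v == n)) (hq : q n = false) :
    l.countP p = l.countP q + l.count n := by
  induction l with
  | nil => simp
  | cons a t ih =>
    simp only [List.countP_cons, List.count_cons, ih, h a]
    by_cases ha : a = n
    · subst ha; simp [hq]; omega
    · have : (a == n) = false := by simp [ha]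
      simp [this]
      omega

-- a predicate holding exactly at n counts occurrences of n
lemma pvCountSingle (l : List Int) (p : Int → Bool) (n : Int)
    (h : ∀ v, p v = (v == n)) : l.countP p = l.count n := by
  induction l with
  | nil => simp
  | cons a t ih => simp [List.countP_cons, List.count_cons, ih, h a]

-- the recurrence evaluated on Counter(vals) is B's direct window count
lemma pvC_eq_cnt (vals : List Int) :
    ∀ k : Nat, pvC (PySem.Dict.counter vals) k = (pvCnt vals (k : Int) : Int) := by
  intro k
  induction k using Nat.strong_induction_on with
  | _ k ih =>
    match k with
    | 0 =>
      have h : pvCnt vals ((0 : Nat) : Int) = vals.count 0 := by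
        apply pvCountSingle
        intro v
        rw [Bool.eq_iff_iff]
        simp only [Bool.and_eq_true, decide_eq_true_eq, beq_iff_eq,
          PySem.Int.mod_eq_emod_of_pos (by norm_num : (0 : Int) < 2)]
        constructor
        · rintro ⟨⟨h1, h2⟩, _⟩; omega
        · rintro rfl; norm_num
      rw [h]
      simp [pvC, pvH, PySem.Dict.getD_counter]
    | 1 =>
      have h : pvCnt vals ((1 : Nat) : Int) = vals.count 1 := by
        apply pvCountSingle
        intro v
        rw [Bool.eq_iff_iff]
        simp only [Bool.and_eq_true, decide_eq_true_eq, beq_iff_eq,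
          PySem.Int.mod_eq_emod_of_pos (by norm_num : (0 : Int) < 2)]
        constructor
        · rintro ⟨⟨h1, h2⟩, h3⟩; omega
        · rintro rfl; norm_num
      rw [h]
      simp [pvC, pvH, PySem.Dict.getD_counter]
    | k + 2 =>
      have hsplit : pvCnt vals ((k + 2 : Nat) : Int)
          = pvCnt vals (k : Int) + vals.count ((k + 2 : Nat) : Int) := by
        apply pvCountSplit
        · intro v
          rw [Bool.eq_iff_iff]
          simp only [Bool.and_eq_true, Bool.or_eq_true, decide_eq_true_eq, beq_iff_eq,
            PySem.Int.mod_eq_emod_of_pos (by norm_num : (0 : Int) < 2)]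
          push_cast
          constructor
          · rintro ⟨⟨h1, h2⟩, h3⟩
            by_cases hv : v = (k : Int) + 2
            · right; exact hv
            · left; exact ⟨⟨h1, by omega⟩, by omega⟩
          · rintro (⟨⟨h1, h2⟩, h3⟩ | rfl)
            · exact ⟨⟨h1, by omega⟩, by omega⟩
            · refine ⟨⟨by omega, le_refl _⟩, rfl⟩
        · rw [Bool.eq_false_iff]
          intro hcon
          simp only [Bool.and_eq_true, decide_eq_true_eq, beq_iff_eq,
            PySem.Int.mod_eq_emod_of_pos (by norm_num : (0 : Int) < 2)] at hcon
          push_cast at hcon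
          omega
      rw [show pvC (PySem.Dict.counter vals) (k + 2)
            = pvC (PySem.Dict.counter vals) k + pvH (PySem.Dict.counter vals) ((k + 2 : Nat) : Int)
          from rfl,
        ih k (by omega), hsplit]
      push_cast
      simp [pvH, PySem.Dict.getD_counter]

-- ===== VERDICT (by name: the statement is the Claim_ definition above) =====
theorem calcAccDistances_spec : Claim_equal_calcAccDistances := by
  intro distances _
  unfold Spec_calcAccDistances calcAccDistances calcAccDistances_alt
  rw [pvHistEq]
  set vals := distances.map (·.2) with hv
  set hist := PySem.Dict.counter vals with hh
  simp only
  rw [← pvMaxEq vals]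
  have h0 : (0 : Int) ≤ vals.foldl max 0 := (PySem.List.le_foldl_max vals 0).1
  have hn : vals.foldl max 0 + 1 = (((vals.foldl max 0).toNat + 1 : Nat) : Int) := by
    push_cast; omega
  rw [hn, pvLoopA hist]
  refine Prod.ext ?_ rfl
  simp only [pvL]
  rw [PySem.List.pyRange_one]
  simp only [sub_zero, Int.toNat_natCast, List.map_map]
  apply List.map_congr_left
  intro k _
  simp only [Function.comp, zero_add]
  rw [hh, pvC_eq_cnt vals k]
  rfl
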